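-- pv_equiv track=rewrite | github.com/Mikhail-Lebedinskiy/Polykov2 | PROBNICS/POLYKOV/Var_1/27/solve.py | medium_solution
-- ===== SOURCE A (Python) =====
-- def medium_solution(n, arr):
--     answer = -1
--     for i in range(n):
--         segment_len = 0
--         for j in range(i + 1, n):
--             if arr[i] >= arr[j]:
--                 segment_len += 1
--             else:
--                 break
--         else:
--             continue
--         answer = max(answer, segment_len)
--     return answer + 1
-- ===== SOURCE B (Python) =====
-- def medium_solution(n, arr):
--     # Monotonic stack: for each index popped at j, j is its next strictly
--     # greater element; the run length before it is j - i - 1.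
--     best = -1
--     stack = []
--     for j in range(n):
--         while stack and arr[stack[-1]] < arr[j]:
--             i = stack.pop()
--             best = max(best, j - i - 1)
--         stack.append(j)
--     return best + 1
-- ===== Notes on version B (the rewrite author's own statement) =====
-- stated objective: faster
-- what changed: Replaced A's quadratic per-index forward scan (with for-else skip) by a single-pass monotonic stack: each index popped at j has j as its next strictly greater element, and B takes max(j - i - 1) over popped indices.
import Mathlib
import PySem

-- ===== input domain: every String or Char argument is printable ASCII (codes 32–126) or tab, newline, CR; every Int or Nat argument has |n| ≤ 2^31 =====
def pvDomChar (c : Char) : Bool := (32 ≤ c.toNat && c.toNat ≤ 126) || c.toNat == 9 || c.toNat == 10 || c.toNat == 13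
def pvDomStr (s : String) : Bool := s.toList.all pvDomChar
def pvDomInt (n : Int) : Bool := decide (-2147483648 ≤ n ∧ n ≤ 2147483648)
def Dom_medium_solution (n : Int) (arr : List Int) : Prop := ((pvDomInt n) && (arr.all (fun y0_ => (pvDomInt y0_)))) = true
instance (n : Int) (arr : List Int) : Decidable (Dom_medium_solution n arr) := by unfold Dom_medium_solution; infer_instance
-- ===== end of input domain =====

-- B replaces A's quadratic per-index forward scan by a one-pass monotonic stack
-- over next-strictly-greater elements (objective: faster, asymptotic O(n) vs O(n^2)).

-- ===== PORT A =====
-- Inner 'for j in range(i+1, n)' loop with break/else: returns 'none' when the loop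
-- runs to completion (the 'else: continue' branch), 'some seg' when it breaks.
-- arr[k] is ported as pyGetD arr k 0: Pre_ guarantees every accessed index is in range.
def pvInnerA (arr : List Int) (ai : Int) (js : List Int) (seg : Int) : Option Int :=
  match js with
  | [] => none
  | j :: rest =>
    if PySem.List.pyGetD arr j 0 ≤ ai then pvInnerA arr ai rest (seg + 1)
    else some seg

def medium_solution (n : Int) (arr : List Int) : Int :=
  ((PySem.List.pyRange 0 n 1).foldl (fun answer i =>
    match pvInnerA arr (PySem.List.pyGetD arr i 0) (PySem.List.pyRange (i + 1) n 1) 0 with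
    | none => answer
    | some s => max answer s) (-1)) + 1

-- ===== PORT B =====
-- The Python 'while stack and arr[stack[-1]] < arr[j]' pop loop; the stack is kept
-- top-first (head = Python's stack[-1]).
def pvPop (arr : List Int) (j : Int) (best : Int) (stack : List Int) : Int × List Int :=
  match stack with
  | [] => (best, [])
  | i :: rest =>
    if PySem.List.pyGetD arr i 0 < PySem.List.pyGetD arr j 0 then
      pvPop arr j (max best (j - i - 1)) rest
    else (best, i :: rest)

def medium_solution_alt (n : Int) (arr : List Int) : Int :=
  (((PySem.List.pyRange 0 n 1).foldl (fun st j =>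
      let bs := pvPop arr j st.1 st.2
      (bs.1, j :: bs.2)) ((-1 : Int), ([] : List Int))).1) + 1

-- ===== PRECONDITION & SPEC =====
-- Python A raises IndexError exactly when n > len(arr) (the outer loop then reaches an
-- out-of-range index); Pre_ admits every input on which A returns.
def Pre_medium_solution (n : Int) (arr : List Int) : Prop := n ≤ (arr.length : Int)
instance (n : Int) (arr : List Int) : Decidable (Pre_medium_solution n arr) := by
  unfold Pre_medium_solution; infer_instance
def pvWitness_medium_solution : Int × List Int := (3, [2, 1, 5])

def Spec_medium_solution (n : Int) (arr : List Int) (out : Int) : Prop := out = medium_solution_alt n arr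
instance (n : Int) (arr : List Int) (out : Int) : Decidable (Spec_medium_solution n arr out) := by unfold Spec_medium_solution; infer_instance

-- ===== CLAIM (what is proved, stated in full; the proofs are below) =====
def Claim_equal_medium_solution : Prop := ∀ (n : Int) (arr : List Int), Dom_medium_solution n arr → Pre_medium_solution n arr → Spec_medium_solution n arr (medium_solution n arr)

-- ===== LEMMAS AND PROOFS =====

-- `pvP arr i m`: index i is "alive" at time m — no element strictly greater than arr[i]
-- occurs strictly between i and m.
def pvP (arr : List Int) (i m : Int) : Prop :=
  0 ≤ i ∧ i < m ∧ ∀ k, i < k → k < m → PySem.List.pyGetD arr k 0 ≤ PySem.List.pyGetD arr i 0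

-- `pvNGE arr i j`: j is THE next strictly greater element of i.
def pvNGE (arr : List Int) (i j : Int) : Prop :=
  pvP arr i j ∧ PySem.List.pyGetD arr i 0 < PySem.List.pyGetD arr j 0

-- b is the max (with floor -1) of j - i - 1 over all next-greater pairs with j < m.
def pvBest (arr : List Int) (b m : Int) : Prop :=
  (b = -1 ∨ ∃ i j, pvNGE arr i j ∧ j < m ∧ b = j - i - 1) ∧
  (∀ i j, pvNGE arr i j → j < m → j - i - 1 ≤ b) ∧ (-1 ≤ b)

-- variant for A's fold: only the first m outer indices processed, inner scan bounded by n
def pvBestA (arr : List Int) (n b m : Int) : Prop :=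
  (b = -1 ∨ ∃ i j, pvNGE arr i j ∧ j < n ∧ i < m ∧ b = j - i - 1) ∧
  (∀ i j, pvNGE arr i j → j < n → i < m → j - i - 1 ≤ b) ∧ (-1 ≤ b)

theorem pvNGE_lt (arr : List Int) (i j : Int) (h : pvNGE arr i j) : i < j := h.1.2.1

theorem pvNGE_unique (arr : List Int) (i j j' : Int)
    (h : pvNGE arr i j) (h' : pvNGE arr i j') : j = j' := by
  rcases h with ⟨⟨_, hij, hall⟩, hgt⟩
  rcases h' with ⟨⟨_, hij', hall'⟩, hgt'⟩
  by_contra hne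
  rcases lt_or_gt_of_ne hne with hlt | hlt
  · exact absurd (hall' j hij hlt) (not_le.mpr hgt)
  · exact absurd (hall j' hij' hlt) (not_le.mpr hgt')

theorem pvBest_unique (arr : List Int) (b b' m : Int)
    (h : pvBest arr b m) (h' : pvBest arr b' m) : b = b' := by
  rcases h with ⟨hat, hub, hlb⟩
  rcases h' with ⟨hat', hub', hlb'⟩
  apply le_antisymm
  · rcases hat with h1 | ⟨i, j, hnge, hjm, rfl⟩
    · omega
    · exact hub' i j hnge hjm
  · rcases hat' with h1 | ⟨i, j, hnge, hjm, rfl⟩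
    · omega
    · exact hub i j hnge hjm

-- ---------- half A : the fold of A computes pvBestA ----------

theorem pvInnerA_none (arr : List Int) (ai n : Int) :
    ∀ (N : ℕ) (t c : Int), (n - t).toNat ≤ N →
      (∀ k, t ≤ k → k < n → PySem.List.pyGetD arr k 0 ≤ ai) →
      pvInnerA arr ai (PySem.List.pyRange t n 1) c = none := by
  intro N
  induction N with
  | zero =>
    intro t c hN _
    rw [PySem.List.pyRange_one_eq_nil (by omega)]
    rfl
  | succ N ih =>
    intro t c hN hall
    by_cases htn : t < n
    · rw [PySem.List.pyRange_one_cons htn]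
      have ht : PySem.List.pyGetD arr t 0 ≤ ai := hall t le_rfl htn
      simp only [pvInnerA, if_pos ht]
      exact ih (t + 1) (c + 1) (by omega) (fun k hk1 hk2 => hall k (by omega) hk2)
    · rw [PySem.List.pyRange_one_eq_nil (by omega)]
      rfl

theorem pvInnerA_some (arr : List Int) (ai n : Int) :
    ∀ (N : ℕ) (t c j' : Int), (j' - t).toNat ≤ N →
      t ≤ j' → j' < n → ai < PySem.List.pyGetD arr j' 0 →
      (∀ k, t ≤ k → k < j' → PySem.List.pyGetD arr k 0 ≤ ai) →
      pvInnerA arr ai (PySem.List.pyRange t n 1) c = some (j' - t + c) := by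
  intro N
  induction N with
  | zero =>
    intro t c j' hN htj hjn hgt _
    have hj : j' = t := by omega
    subst hj
    rw [PySem.List.pyRange_one_cons (by omega)]
    simp only [pvInnerA, if_neg (not_le.mpr hgt)]
    congr 1; omega
  | succ N ih =>
    intro t c j' hN htj hjn hgt hall
    by_cases hj : j' = t
    · subst hj
      rw [PySem.List.pyRange_one_cons (by omega)]
      simp only [pvInnerA, if_neg (not_le.mpr hgt)]
      congr 1; omega
    · have htn : t < n := by omega
      rw [PySem.List.pyRange_one_cons htn]
      have ht : PySem.List.pyGetD arr t 0 ≤ ai := hall t le_rfl (by omega)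
      simp only [pvInnerA, if_pos ht]
      have := ih (t + 1) (c + 1) j' (by omega) (by omega) hjn hgt
        (fun k hk1 hk2 => hall k (by omega) hk2)
      rw [this]
      congr 1; omega

-- Either no element of [t, n) exceeds ai, or there is a first one.
theorem pvExceed_total (arr : List Int) (ai n : Int) :
    ∀ (N : ℕ) (t : Int), (n - t).toNat ≤ N →
      (∀ k, t ≤ k → k < n → PySem.List.pyGetD arr k 0 ≤ ai) ∨
      (∃ j', t ≤ j' ∧ j' < n ∧ ai < PySem.List.pyGetD arr j' 0 ∧
        ∀ k, t ≤ k → k < j' → PySem.List.pyGetD arr k 0 ≤ ai) := by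
  intro N
  induction N with
  | zero =>
    intro t hN
    left; intro k hk1 hk2; omega
  | succ N ih
  =>
    intro t hN
    by_cases htn : t < n
    · by_cases ht : PySem.List.pyGetD arr t 0 ≤ ai
      · rcases ih (t + 1) (by omega) with h | ⟨j', h1, h2, h3, h4⟩
        · left; intro k hk1 hk2
          rcases eq_or_lt_of_le hk1 with rfl | hk
          · exact ht
          · exact h k (by omega) hk2
        · right; exact ⟨j', by omega, h2, h3, fun k hk1 hk2 => by
            rcases eq_or_lt_of_le hk1 with rfl | hk
            · exact ht
            · exact h4 k (by omega) hk2⟩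
      · right; exact ⟨t, le_rfl, htn, not_le.mp ht, fun k hk1 hk2 => by omega⟩
    · left; intro k hk1 hk2; omega

theorem pvFoldA_inv (arr : List Int) (n : Int) :
    ∀ (m : Int), 0 ≤ m →
      pvBestA arr n ((PySem.List.pyRange 0 m 1).foldl (fun answer i =>
        match pvInnerA arr (PySem.List.pyGetD arr i 0) (PySem.List.pyRange (i + 1) n 1) 0 with
        | none => answer
        | some s => max answer s) (-1)) m := by
  intro m hm
  induction m, hm using Int.le_induction with
  | base =>
    rw [PySem.List.pyRange_one_eq_nil le_rfl]
    refine ⟨Or.inl rfl, fun i j hnge _ him => ?_, le_rfl⟩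
    have := hnge.1.1; omega
  | succ m hm ih =>
    rw [PySem.List.pyRange_one_succ_right hm, List.foldl_append, List.foldl_cons, List.foldl_nil]
    set b := (PySem.List.pyRange 0 m 1).foldl (fun answer i =>
        match pvInnerA arr (PySem.List.pyGetD arr i 0) (PySem.List.pyRange (i + 1) n 1) 0 with
        | none => answer
        | some s => max answer s) (-1) with hb
    rcases pvExceed_total arr (PySem.List.pyGetD arr m 0) n (n - (m+1)).toNat (m + 1) le_rfl with
      hnone | ⟨j', h1, h2, h3, h4⟩
    · rw [pvInnerA_none arr _ n (n - (m+1)).toNat (m + 1) 0 le_rfl hnone]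
      show pvBestA arr n b (m + 1)
      refine ⟨?_, ?_, ih.2.2⟩
      · rcases ih.1 with h | ⟨i, j, hnge, hjn, him, heq⟩
        · exact Or.inl h
        · exact Or.inr ⟨i, j, hnge, hjn, by omega, heq⟩
      · intro i j hnge hjn him
        by_cases hi : i = m
        · subst hi
          rcases hnge with ⟨⟨_, hij, hall⟩, hgt⟩
          exact absurd (hnone j (by omega) hjn) (not_le.mpr hgt)
        · exact ih.2.1 i j hnge hjn (by omega)
    · have hnge_m : pvNGE arr m j' :=
        ⟨⟨hm, by omega, fun k hk1 hk2 => h4 k (by omega) hk2⟩, h3⟩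
      rw [pvInnerA_some arr _ n (j' - (m+1)).toNat (m + 1) 0 j' le_rfl h1 h2 h3 h4]
      show pvBestA arr n (max b (j' - (m + 1) + 0)) (m + 1)
      refine ⟨?_, ?_, by have := ih.2.2; omega⟩
      · rcases max_choice b (j' - (m + 1) + 0) with h | h
        · rw [h]
          rcases ih.1 with hh | ⟨i, j, hnge, hjn, him, heq⟩
          · exact Or.inl hh
          · exact Or.inr ⟨i, j, hnge, hjn, by omega, heq⟩
        · rw [h]
          exact Or.inr ⟨m, j', hnge_m, h2, by omega, by omega⟩
      · intro i j hnge hjn him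
        by_cases hi : i = m
        · subst hi
          have := pvNGE_unique arr i j j' hnge hnge_m
          subst this
          omega
        · have := ih.2.1 i j hnge hjn (by omega)
          omega

-- ---------- half B : the monotonic-stack fold maintains pvBest ----------

def pvInv (arr : List Int) (st : Int × List Int) (m : Int) : Prop :=
  pvBest arr st.1 m ∧ (∀ x, x ∈ st.2 ↔ pvP arr x m) ∧ st.2.Pairwise (· > ·)

theorem pvPop_spec (arr : List Int) (m : Int) :
    ∀ (s : List Int) (b : Int),
      (∀ i ∈ s, pvP arr i m) → s.Pairwise (· > ·) →
      (∀ x, x ∈ (pvPop arr m b s).2 ↔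
         x ∈ s ∧ PySem.List.pyGetD arr m 0 ≤ PySem.List.pyGetD arr x 0) ∧
      (pvPop arr m b s).2.Pairwise (· > ·) ∧
      ((pvPop arr m b s).1 = b ∨
        ∃ i ∈ s, PySem.List.pyGetD arr i 0 < PySem.List.pyGetD arr m 0 ∧
          (pvPop arr m b s).1 = m - i - 1) ∧
      b ≤ (pvPop arr m b s).1 ∧
      (∀ i ∈ s, PySem.List.pyGetD arr i 0 < PySem.List.pyGetD arr m 0 →
        m - i - 1 ≤ (pvPop arr m b s).1) := by
  intro s
  induction s with
  | nil =>
    intro b _ _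
    refine ⟨by simp [pvPop], by simp [pvPop], Or.inl rfl, le_rfl, by simp⟩
  | cons i rest ih =>
    intro b hP hpw
    by_cases hlt : PySem.List.pyGetD arr i 0 < PySem.List.pyGetD arr m 0
    · have hstep : pvPop arr m b (i :: rest) = pvPop arr m (max b (m - i - 1)) rest := by
        simp [pvPop, if_pos hlt]
      rcases ih (max b (m - i - 1)) (fun x hx => hP x (List.mem_cons_of_mem _ hx))
        (List.Pairwise.sublist (List.sublist_cons_self i rest) hpw) with
        ⟨hmem, hpw', hat, hle, hub⟩
      rw [hstep]
      refine ⟨?_, hpw', ?_, ?_, ?_⟩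
      · intro x
        rw [hmem x]
        constructor
        · rintro ⟨hx, hge⟩; exact ⟨List.mem_cons_of_mem _ hx, hge⟩
        · rintro ⟨hx, hge⟩
          rcases List.mem_cons.mp hx with rfl | hx
          · omega
          · exact ⟨hx, hge⟩
      · rcases hat with h | ⟨i', hi', h1, h2⟩
        · rcases max_choice b (m - i - 1) with hmx | hmx
          · exact Or.inl (h.trans hmx)
          · exact Or.inr ⟨i, List.mem_cons_self, hlt, h.trans hmx⟩
        · exact Or.inr ⟨i', List.mem_cons_of_mem _ hi', h1, h2⟩
      · omega
      · intro i' hi' hlt'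
        rcases List.mem_cons.mp hi' with rfl | hi'
        · omega
        · exact hub i' hi' hlt'
    · have hstep : pvPop arr m b (i :: rest) = (b, i :: rest) := by
        simp [pvPop, if_neg hlt]
      rw [hstep]
      have hge_all : ∀ x ∈ i :: rest,
          PySem.List.pyGetD arr m 0 ≤ PySem.List.pyGetD arr x 0 := by
        intro x hx
        rcases List.mem_cons.mp hx with rfl | hx
        · omega
        · -- x is deeper in the stack, so x < i and arr[i] ≤ arr[x] via pvP x m
          have hxi : x < i := by
            have := (List.pairwise_cons.mp hpw).1 x hx
            omega
          have hPx := hP x (List.mem_cons_of_mem _ hx)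
          have hPi := hP i List.mem_cons_self
          have : PySem.List.pyGetD arr i 0 ≤ PySem.List.pyGetD arr x 0 :=
            hPx.2.2 i hxi hPi.2.1
          omega
      refine ⟨?_, hpw, Or.inl rfl, le_rfl, ?_⟩
      · intro x
        constructor
        · intro hx; exact ⟨hx, hge_all x hx⟩
        · rintro ⟨hx, _⟩; exact hx
      · intro i' hi' hlt'
        exact absurd (hge_all i' hi') (not_le.mpr hlt')

theorem pvStep_inv (arr : List Int) (st : Int × List Int) (m : Int)
    (hm : 0 ≤ m) (hinv : pvInv arr st m) :
    pvInv arr ((pvPop arr m st.1 st.2).1, m :: (pvPop arr m st.1 st.2).2) (m + 1) := by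
  rcases hinv with ⟨⟨hat, hub, hlb⟩, hmem, hpw⟩
  have hPs : ∀ i ∈ st.2, pvP arr i m := fun i hi => (hmem i).mp hi
  rcases pvPop_spec arr m st.2 st.1 hPs hpw with ⟨hmem', hpw', hat', hle', hub'⟩
  refine ⟨⟨?_, ?_, by omega⟩, ?_, ?_⟩
  · -- attained
    rcases hat' with h | ⟨i, hi, hlt, heq⟩
    · rw [h]
      rcases hat with hh | ⟨i, j, hnge, hjm, heq2⟩
      · exact Or.inl hh
      · exact Or.inr ⟨i, j, hnge, by omega, heq2⟩
    · have hPi := hPs i hi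
      exact Or.inr ⟨i, m, ⟨hPi, hlt⟩, by omega, heq⟩
  · -- upper bound
    intro i j hnge hjm1
    by_cases hj : j = m
    · have hPi : pvP arr i m := hj ▸ hnge.1
      have hi : i ∈ st.2 := (hmem i).mpr hPi
      have := hub' i hi (hj ▸ hnge.2)
      omega
    · have := hub i j hnge (by omega)
      omega
  · -- membership
    intro x
    constructor
    · intro hx
      rcases List.mem_cons.mp hx with hxeq | hx
      · exact ⟨by omega, by omega, fun k hk1 hk2 => by omega⟩
      · rcases (hmem' x).mp hx with ⟨hxs, hge⟩
        obtain ⟨hx0, hxm, hxall⟩ := (hmem x).mp hxs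
        refine ⟨hx0, by omega, fun k hk1 hk2 => ?_⟩
        by_cases hk : k = m
        · rw [hk]; exact hge
        · exact hxall k hk1 (by omega)
    · intro hPx
      by_cases hx : x = m
      · subst hx; exact List.mem_cons_self
      · have hxm : x < m := by rcases hPx with ⟨_, h2, _⟩; omega
        apply List.mem_cons_of_mem
        rw [hmem' x]
        refine ⟨(hmem x).mpr ⟨hPx.1, hxm, fun k hk1 hk2 => hPx.2.2 k hk1 (by omega)⟩, ?_⟩
        exact hPx.2.2 m hxm (by omega)
  · -- pairwise
    rw [List.pairwise_cons]
    refine ⟨fun x hx => ?_, hpw'⟩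
    have := (hmem' x).mp hx
    have := (hmem x).mp this.1
    rcases this with ⟨_, h2, _⟩
    omega

theorem pvFoldB_inv (arr : List Int) :
    ∀ (m : Int), 0 ≤ m →
      pvInv arr ((PySem.List.pyRange 0 m 1).foldl (fun st j =>
        let bs := pvPop arr j st.1 st.2
        (bs.1, j :: bs.2)) ((-1 : Int), ([] : List Int))) m := by
  intro m hm
  induction m, hm using Int.le_induction with
  | base =>
    rw [PySem.List.pyRange_one_eq_nil le_rfl]
    simp only [List.foldl_nil]
    refine ⟨⟨Or.inl rfl, fun i j hnge hj => ?_, le_rfl⟩, fun x => ?_, by simp⟩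
    · have h1 := hnge.1.1
      have h2 := hnge.1.2.1
      omega
    · simp only [List.not_mem_nil, false_iff]
      rintro ⟨h1, h2, _⟩
      exact absurd h1 (by omega)
  | succ m hm ih =>
    rw [PySem.List.pyRange_one_succ_right hm, List.foldl_append, List.foldl_cons, List.foldl_nil]
    exact pvStep_inv arr _ m hm ih

-- ---------- conclusion ----------

theorem pvPorts_eq (n : Int) (arr : List Int) :
    medium_solution n arr = medium_solution_alt n arr := by
  unfold medium_solution medium_solution_alt
  by_cases hn : 0 ≤ n
  · have hA := pvFoldA_inv arr n n hn
    have hB := pvFoldB_inv arr n hn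
    have hA' : pvBest arr ((PySem.List.pyRange 0 n 1).foldl (fun answer i =>
        match pvInnerA arr (PySem.List.pyGetD arr i 0) (PySem.List.pyRange (i + 1) n 1) 0 with
        | none => answer
        | some s => max answer s) (-1)) n := by
      rcases hA with ⟨hat, hub, hlb⟩
      refine ⟨?_, ?_, hlb⟩
      · rcases hat with h | ⟨i, j, hnge, hjn, _, heq⟩
        · exact Or.inl h
        · exact Or.inr ⟨i, j, hnge, hjn, heq⟩
      · intro i j hnge hjn
        exact hub i j hnge hjn (by have := pvNGE_lt arr i j hnge; omega)
    have := pvBest_unique arr _ _ n hA' hB.1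
    omega
  · rw [PySem.List.pyRange_one_eq_nil (by omega)]
    simp

-- ===== VERDICT (by name: the statement is the Claim_ definition above) =====
theorem medium_solution_spec : Claim_equal_medium_solution := by
  intro n arr _ _
  unfold Spec_medium_solution
  exact pvPorts_eq n arr
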